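-- pv_equiv track=rewrite | github.com/wseungjin/codingTest | line/2021Spring/2.py | is4
-- ===== SOURCE A (Python) =====
-- def is4(string):
--     previous = string[0]
--     currentCount = 1
--
--     for i in range(1, len(string)):
--         if(previous == string[i]):
--             currentCount += 1
--         else:
--             previous = string[i]
--             currentCount = 1
--
--         if currentCount >= 4:
--             return False
--     return True
-- ===== SOURCE B (Python) =====
-- def is4(string):
--     return all(string[i] != string[i + 1]
--                or string[i + 1] != string[i + 2]
--                or string[i + 2] != string[i + 3]
--                for i in range(len(string) - 3))
-- ===== Notes on version B (the rewrite author's own statement) =====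
-- stated objective: idiomatic
-- what changed: Replaced A's previous/currentCount run-length state machine (with early return) by a stateless sliding-window all(...) over the 4-character windows of the string.
-- outside the precondition, e.g. on is4(''): A raises IndexError, B returns True
import Mathlib
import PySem

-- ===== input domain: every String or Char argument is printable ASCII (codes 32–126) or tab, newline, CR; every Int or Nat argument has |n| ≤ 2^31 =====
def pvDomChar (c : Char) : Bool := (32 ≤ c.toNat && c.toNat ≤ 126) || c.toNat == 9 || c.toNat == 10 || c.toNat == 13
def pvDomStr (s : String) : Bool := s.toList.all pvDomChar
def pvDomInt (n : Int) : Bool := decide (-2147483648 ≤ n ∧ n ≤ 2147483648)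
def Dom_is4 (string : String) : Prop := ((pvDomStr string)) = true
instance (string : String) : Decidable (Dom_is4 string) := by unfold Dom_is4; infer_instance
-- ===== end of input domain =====

-- B replaces A's run-length state machine by an idiomatic sliding-window check over 4-char windows (same cost).

-- ===== PORT A =====
-- the for-loop over i in range(1, len): state (previous, currentCount), early return on count >= 4
def is4Go : List Char → Char → Int → Bool
  | [], _, _ => true
  | c :: rest, previous, currentCount =>
    let previous' := if previous == c then previous else c
    let currentCount' := if previous == c then currentCount + 1 else 1
    if currentCount' ≥ 4 then false else is4Go rest previous' currentCount'

def is4 (string : String) : Bool :=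
  match string.toList with
  | [] => true          -- Python raises IndexError at string[0]; excluded by Pre_is4
  | c :: rest => is4Go rest c 1

-- ===== PORT B =====
def is4_alt (string : String) : Bool :=
  let l := string.toList
  (List.range (l.length - 3)).all (fun i =>
    (l.getD i ' ' != l.getD (i + 1) ' ') ||
    (l.getD (i + 1) ' ' != l.getD (i + 2) ' ') ||
    (l.getD (i + 2) ' ' != l.getD (i + 3) ' '))

-- ===== PRECONDITION & SPEC =====
-- Pre_ excludes only the empty string, on which A raises IndexError at string[0].
def Pre_is4 (string : String) : Prop := string ≠ ""
instance (string : String) : Decidable (Pre_is4 string) := by unfold Pre_is4; infer_instance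
def pvWitness_is4 : String := "aab"

def Spec_is4 (string : String) (out : Bool) : Prop := out = is4_alt string
instance (string : String) (out : Bool) : Decidable (Spec_is4 string out) := by unfold Spec_is4; infer_instance

-- ===== CLAIM (what is proved, stated in full; the proofs are below) =====
def Claim_equal_is4 : Prop := ∀ (string : String), Dom_is4 string → Pre_is4 string → Spec_is4 string (is4 string)

-- ===== LEMMAS AND PROOFS =====

-- proof-side characterisation: no 4 equal consecutive characters
def noQuad : List Char → Bool
  | a :: b :: c :: d :: t => if a == b && b == c && c == d then false else noQuad (b :: c :: d :: t)
  | _ => true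

theorem noQuad_short (l : List Char) (h : l.length ≤ 3) : noQuad l = true := by
  match l with
  | [] => rfl
  | [_] => rfl
  | [_, _] => rfl
  | [_, _, _] => rfl
  | _ :: _ :: _ :: _ :: _ => simp at h; omega

theorem noQuad_ne1 (p q : Char) (ys : List Char) (h : p ≠ q) :
    noQuad (p :: q :: ys) = noQuad (q :: ys) := by
  match ys with
  | [] => rfl
  | [_] => rfl
  | a :: b :: t => simp [noQuad, h]

theorem noQuad_ne2 (p q : Char) (ys : List Char) (h : p ≠ q) :
    noQuad (p :: p :: q :: ys) = noQuad (q :: ys) := by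
  match ys with
  | [] => rfl
  | a :: t =>
    have := noQuad_ne1 p q (a :: t) h
    simp [noQuad, h] at this ⊢
    exact this

theorem noQuad_ne3 (p q : Char) (ys : List Char) (h : p ≠ q) :
    noQuad (p :: p :: p :: q :: ys) = noQuad (q :: ys) := by
  have := noQuad_ne2 p q ys h
  simp [noQuad, h] at this ⊢
  exact this

theorem is4Go_eq_noQuad (l : List Char) (prev : Char) (cnt : Int)
    (h1 : 1 ≤ cnt) (h3 : cnt ≤ 3) :
    is4Go l prev cnt = noQuad (List.replicate cnt.toNat prev ++ l) := by
  induction l generalizing prev cnt with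
  | nil =>
    rw [is4Go, List.append_nil, noQuad_short]
    simp; omega
  | cons c rest ih =>
    rw [is4Go]
    by_cases hpc : prev = c
    · subst hpc
      simp only [beq_self_eq_true, if_true]
      by_cases h4 : cnt + 1 ≥ 4
      · have hc : cnt.toNat = 3 := by omega
        rw [if_pos h4, hc]
        simp [noQuad, List.replicate]
      · rw [if_neg h4, ih prev (cnt + 1) (by omega) (by omega)]
        have : cnt.toNat + 1 = (cnt + 1).toNat := by omega
        rw [← this, List.replicate_succ', List.append_assoc]
        rfl
    · simp only [beq_iff_eq]
      rw [if_neg hpc, if_neg hpc, if_neg (show ¬((1 : Int) ≥ 4) by norm_num)]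
      rw [ih c 1 (by omega) (by omega)]
      have hone : (1 : Int).toNat = 1 := rfl
      rw [hone]
      have : List.replicate 1 c ++ rest = c :: rest := rfl
      rw [this]
      interval_cases hcn : cnt
      · exact (noQuad_ne1 prev c rest hpc).symm
      · exact (noQuad_ne2 prev c rest hpc).symm
      · exact (noQuad_ne3 prev c rest hpc).symm

-- B's window predicate on a list
def winOK (l : List Char) (i : Nat) : Bool :=
  (l.getD i ' ' != l.getD (i + 1) ' ') ||
  (l.getD (i + 1) ' ' != l.getD (i + 2) ' ') ||
  (l.getD (i + 2) ' ' != l.getD (i + 3) ' ')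

def allB (l : List Char) : Bool := (List.range (l.length - 3)).all (winOK l)

theorem winOK_shift (a : Char) (l : List Char) (i : Nat) :
    winOK (a :: l) (i + 1) = winOK l i := by
  simp [winOK]

theorem noQuad_eq_allB (l : List Char) : noQuad l = allB l := by
  induction l with
  | nil => rfl
  | cons a tail ih =>
    match tail, ih with
    | [], _ => rfl
    | [_], _ => rfl
    | [_, _], _ => rfl
    | b :: c :: d :: t, ih =>
      have hlen : (a :: b :: c :: d :: t).length - 3 = (b :: c :: d :: t).length - 3 + 1 := by
        simp
      rw [noQuad, ih]
      unfold allB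
      rw [hlen, List.range_succ_eq_map, List.all_cons, List.all_map]
      have hcomp : (winOK (a :: b :: c :: d :: t) ∘ Nat.succ) = winOK (b :: c :: d :: t) :=
        funext fun i => winOK_shift a (b :: c :: d :: t) i
      rw [hcomp]
      have hwin : winOK (a :: b :: c :: d :: t) 0 = !(a == b && b == c && c == d) := by
        simp [winOK, bne, Bool.not_and]
      rw [hwin]
      cases h : (a == b && b == c && c == d) <;> simp_all

-- ===== VERDICT (by name: the statement is the Claim_ definition above) =====
theorem is4_spec : Claim_equal_is4 := by
  intro s _ hpre
  unfold Spec_is4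
  obtain ⟨c, rest, hl⟩ : ∃ c rest, s.toList = c :: rest := by
    cases h : s.toList with
    | nil =>
      exact absurd (by simpa using congrArg String.ofList h) hpre
    | cons c rest => exact ⟨c, rest, rfl⟩
  unfold is4 is4_alt
  rw [hl]
  show is4Go rest c 1 = allB (c :: rest)
  rw [is4Go_eq_noQuad rest c 1 (by norm_num) (by norm_num)]
  have h1 : List.replicate (1 : Int).toNat c ++ rest = c :: rest := rfl
  rw [h1, noQuad_eq_allB]
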